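-- pv_equiv track=rewrite | github.com/JSpeleers/AdventOfCode | 2023/05/seeds_location_part2.py | _get_translation_maps
-- ===== SOURCE A (Python) =====
-- def _get_translation_maps(map_text):
--     maps = []
--     current_map = []
--     for line in map_text:
--         if not line.rstrip():
--             continue
--         elif line[0].isdigit():
--             # [source_start, source_end, destination_start, destination_end, distance]
--             vals = [int(i) for i in line.split()]
--             current_map.append([vals[1], vals[1] + vals[2] - 1, vals[0], vals[0] + vals[2] - 1, vals[2]])
--         else:
--             maps.append(sorted(current_map))
--             current_map = []
--     maps.append(sorted(current_map))
--     return maps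
-- ===== SOURCE B (Python) =====
-- def _get_translation_maps(map_text):
--     def _is_header(line):
--         return bool(line.rstrip()) and not line[0].isdigit()
--
--     def _row(line):
--         vals = [int(t) for t in line.split()]
--         return [vals[1], vals[1] + vals[2] - 1, vals[0], vals[0] + vals[2] - 1, vals[2]]
--
--     def _segment_map(segment):
--         return sorted(_row(l) for l in segment if l.rstrip())
--
--     maps = []
--     start = 0
--     for i, line in enumerate(map_text):
--         if _is_header(line):
--             maps.append(_segment_map(map_text[start:i]))
--             start = i + 1
--     maps.append(_segment_map(map_text[start:]))
--     return maps
-- ===== Notes on version B (the rewrite author's own statement) =====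
-- stated objective: alternative
-- what changed: A makes one fold over the lines with a running row accumulator that is flushed and reset at each header; B instead walks enumerate(map_text) to find the header (delimiter) positions and slices the input into the segments between consecutive headers, mapping each segment to its sorted row list.
import Mathlib
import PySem

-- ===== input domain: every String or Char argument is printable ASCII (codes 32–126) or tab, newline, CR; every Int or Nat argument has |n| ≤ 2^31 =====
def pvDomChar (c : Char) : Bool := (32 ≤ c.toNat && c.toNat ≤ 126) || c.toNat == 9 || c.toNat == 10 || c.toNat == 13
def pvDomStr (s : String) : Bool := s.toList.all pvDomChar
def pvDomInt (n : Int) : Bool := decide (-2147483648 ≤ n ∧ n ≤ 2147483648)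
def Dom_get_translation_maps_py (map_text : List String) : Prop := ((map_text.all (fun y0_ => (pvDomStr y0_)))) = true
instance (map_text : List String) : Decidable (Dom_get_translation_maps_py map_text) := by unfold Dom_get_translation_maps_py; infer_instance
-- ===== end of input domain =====

-- B re-implements the parser by a different decomposition: instead of A's single fold that
-- accumulates rows and flushes them at each header, B scans for the header (delimiter) positions
-- and slices the input into the segments between them, mapping each segment to its sorted row
-- list (same asymptotic cost, 'alternative').

-- ===== PORT A =====
-- shared primitive helpers (identical subexpressions of both Pythons)
-- not line.rstrip()
def pvBlank (line : String) : Bool := PySem.Chars.rstrip line.toList == []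
-- line[0].isdigit(); only evaluated on non-blank (hence nonempty) lines, the [] default is unreachable there
def pvHeadDigit (line : String) : Bool :=
  match line.toList with
  | [] => false
  | c :: _ => PySem.Chars.isdigit c
-- [vals[1], vals[1]+vals[2]-1, vals[0], vals[0]+vals[2]-1, vals[2]] with vals = [int(i) for i in line.split()];
-- the getD 0 defaults stand for Python's ValueError/IndexError, excluded by Pre_ below
def pvRow (line : String) : List Int :=
  let vals := (PySem.Str.split₀ line).map (fun t => (PySem.Int.ofStr? t).getD 0)
  [PySem.List.pyGetD vals 1 0, PySem.List.pyGetD vals 1 0 + PySem.List.pyGetD vals 2 0 - 1,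
   PySem.List.pyGetD vals 0 0, PySem.List.pyGetD vals 0 0 + PySem.List.pyGetD vals 2 0 - 1,
   PySem.List.pyGetD vals 2 0]

-- A's loop body: state = (maps, current_map)
def pvAStep (st : List (List (List Int)) × List (List Int)) (line : String) :
    List (List (List Int)) × List (List Int) :=
  if pvBlank line then st
  else if pvHeadDigit line then (st.1, st.2 ++ [pvRow line])
  else (st.1 ++ [PySem.List.sorted st.2 (fun x => x) false], [])

def get_translation_maps_py (map_text : List String) : List (List (List Int)) :=
  let st := map_text.foldl pvAStep ([], [])
  st.1 ++ [PySem.List.sorted st.2 (fun x => x) false]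

-- ===== PORT B =====
-- bool(line.rstrip()) and not line[0].isdigit()
def pvIsHeader (line : String) : Bool := !pvBlank line && !pvHeadDigit line

-- sorted(_row(l) for l in segment if l.rstrip())
def pvSegMap (segment : List String) : List (List Int) :=
  PySem.List.sorted ((segment.filter (fun l => !pvBlank l)).map pvRow) (fun x => x) false

-- B's loop body over enumerate(map_text): state = (maps, start)
def pvBStep (map_text : List String) (st : List (List (List Int)) × Int) (p : Int × String) :
    List (List (List Int)) × Int :=
  if pvIsHeader p.2 then
    (st.1 ++ [pvSegMap (PySem.List.slice map_text (some st.2) (some p.1))], p.1 + 1)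
  else st

def get_translation_maps_py_alt (map_text : List String) : List (List (List Int)) :=
  let st := (PySem.List.enumerate map_text 0).foldl (pvBStep map_text) ([], 0)
  st.1 ++ [pvSegMap (PySem.List.slice map_text (some st.2) none)]

-- ===== PRECONDITION & SPEC =====
-- Pre_ excludes exactly the inputs where Python A raises: a non-blank, digit-initial line whose
-- whitespace-split tokens are fewer than 3 (IndexError on vals[2]) or not all int()-parseable (ValueError).
def Pre_get_translation_maps_py (map_text : List String) : Prop :=
  ∀ line ∈ map_text, pvBlank line = false → pvHeadDigit line = true →
    3 ≤ (PySem.Str.split₀ line).length ∧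
    ∀ t ∈ PySem.Str.split₀ line, (PySem.Int.ofStr? t).isSome
instance (map_text : List String) : Decidable (Pre_get_translation_maps_py map_text) := by
  unfold Pre_get_translation_maps_py; infer_instance

def pvWitness_get_translation_maps_py : List String := ["seed-to-soil map:", "1 2 3", "", "50 98 2"]

def Spec_get_translation_maps_py (map_text : List String) (out : List (List (List Int))) : Prop := out = get_translation_maps_py_alt map_text
instance (map_text : List String) (out : List (List (List Int))) : Decidable (Spec_get_translation_maps_py map_text out) := by unfold Spec_get_translation_maps_py; infer_instance

-- ===== CLAIM (what is proved, stated in full; the proofs are below) =====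
def Claim_equal_get_translation_maps_py : Prop := ∀ (map_text : List String), Dom_get_translation_maps_py map_text → Pre_get_translation_maps_py map_text → Spec_get_translation_maps_py map_text (get_translation_maps_py map_text)

-- ===== LEMMAS AND PROOFS =====

-- the common spine: what remains to be produced after 'lines' with 'cur' rows already accumulated
def pvSpine : List String → List (List Int) → List (List (List Int))
  | [], cur => [PySem.List.sorted cur (fun x => x) false]
  | l :: ls, cur =>
    if pvBlank l then pvSpine ls cur
    else if pvHeadDigit l then pvSpine ls (cur ++ [pvRow l])
    else PySem.List.sorted cur (fun x => x) false :: pvSpine ls []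

theorem pvA_loop (xs : List String) (maps : List (List (List Int))) (cur : List (List Int)) :
    (xs.foldl pvAStep (maps, cur)).1 ++
      [PySem.List.sorted (xs.foldl pvAStep (maps, cur)).2 (fun x => x) false] =
    maps ++ pvSpine xs cur := by
  induction xs generalizing maps cur with
  | nil => simp [pvSpine]
  | cons l ls ih =>
    simp only [List.foldl_cons, pvAStep, pvSpine]
    split_ifs with hb hd
    · exact ih maps cur
    · exact ih maps (cur ++ [pvRow l])
    · rw [ih]; simp

-- a run of non-header lines only grows the pending row accumulator
theorem pvSpine_pending (pending rest : List String) (cur : List (List Int))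
    (h : ∀ l ∈ pending, pvIsHeader l = false) :
    pvSpine (pending ++ rest) cur =
      pvSpine rest (cur ++ (pending.filter (fun l => !pvBlank l)).map pvRow) := by
  induction pending generalizing cur with
  | nil => simp
  | cons l ls ih =>
    have hl : pvIsHeader l = false := h l (by simp)
    have hrest : ∀ x ∈ ls, pvIsHeader x = false := fun x hx => h x (by simp [hx])
    by_cases hb : pvBlank l
    · simp only [List.cons_append, pvSpine, hb, if_true, List.filter_cons, Bool.not_true]
      simpa [hb] using ih cur hrest
    · have hd : pvHeadDigit l = true := by
        revert hl; unfold pvIsHeader; cases hdd : pvHeadDigit l <;> simp [hb]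
      simp only [List.cons_append, pvSpine, hb, hd, if_true, List.filter_cons, Bool.not_false]
      simp only [Bool.false_eq_true, if_false]
      rw [ih (cur ++ [pvRow l]) hrest]
      simp [List.append_assoc]

theorem pvBStep_pos (mt : List String) (st : List (List (List Int)) × Int) (i : Int)
    (x : String) (hx : pvIsHeader x = true) :
    pvBStep mt st (i, x) =
      (st.1 ++ [pvSegMap (PySem.List.slice mt (some st.2) (some i))], i + 1) := by
  simp [pvBStep, hx]

theorem pvBStep_neg (mt : List String) (st : List (List (List Int)) × Int) (i : Int)
    (x : String) (hx : pvIsHeader x = false) :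
    pvBStep mt st (i, x) = st := by
  simp [pvBStep, hx]

theorem pvB_loop (map_text : List String) (xs : List String) :
    ∀ (pending : List String) (maps : List (List (List Int))) (s : Nat),
    map_text.drop s = pending ++ xs →
    (∀ l ∈ pending, pvIsHeader l = false) →
    (let st := (PySem.List.enumerate xs ((s + pending.length : Nat) : Int)).foldl
        (pvBStep map_text) (maps, (s : Int));
     st.1 ++ [pvSegMap (PySem.List.slice map_text (some st.2) none)]) =
    maps ++ pvSpine (pending ++ xs) [] := by
  induction xs with
  | nil =>
    intro pending maps s hdrop hpend
    simp only [PySem.List.enumerate_nil, List.foldl_nil]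
    rw [PySem.List.slice_from_natCast, hdrop]
    rw [pvSpine_pending pending [] [] hpend]
    simp [pvSpine, pvSegMap]
  | cons x xs ih =>
    intro pending maps s hdrop hpend
    simp only [PySem.List.enumerate_cons, List.foldl_cons]
    by_cases hx : pvIsHeader x = true
    · rw [pvBStep_pos map_text _ _ _ hx]
      have hseg : PySem.List.slice map_text (some ((maps, (s : Int)).2))
          (some ((s + pending.length : Nat) : Int)) = pending := by
        rw [PySem.List.slice_natCast, hdrop,
          show s + pending.length - s = pending.length by omega, List.take_left]
      rw [hseg]
      have hcast : ((s + pending.length : Nat) : Int) + 1 =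
          ((s + pending.length + 1 : Nat) : Int) := by push_cast; ring
      rw [hcast]
      have hdrop' : map_text.drop (s + pending.length + 1) = [] ++ xs := by
        have h1 : map_text.drop (s + pending.length + 1) =
            (map_text.drop s).drop (pending.length + 1) := by
          rw [List.drop_drop, Nat.add_assoc]
        rw [h1, hdrop, List.append_cons,
          show pending.length + 1 = (pending ++ [x]).length + 0 by simp,
          List.drop_length_add_append]
        rfl
      have hrec := ih [] ((maps, (s : Int)).1 ++ [pvSegMap pending]) (s + pending.length + 1)
        hdrop' (by simp)
      simp only [List.length_nil, Nat.add_zero, List.nil_append] at hrec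
      rw [hrec]
      have hb : pvBlank x = false := by
        revert hx; unfold pvIsHeader; cases h : pvBlank x <;> simp
      have hd : pvHeadDigit x = false := by
        revert hx; unfold pvIsHeader; cases h : pvHeadDigit x <;> simp [hb]
      rw [pvSpine_pending pending (x :: xs) [] hpend]
      simp [pvSpine, hb, hd, pvSegMap]
    · rw [pvBStep_neg map_text _ _ _ (by simpa using hx)]
      have hdrop' : map_text.drop s = (pending ++ [x]) ++ xs := by
        rw [hdrop, List.append_cons]
      have hpend' : ∀ l ∈ pending ++ [x], pvIsHeader l = false := by
        intro l hl
        rcases List.mem_append.mp hl with h | h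
        · exact hpend l h
        · have hlx : l = x := by simpa using h
          subst hlx
          simpa using hx
      have hcast : ((s + pending.length : Nat) : Int) + 1 =
          ((s + (pending ++ [x]).length : Nat) : Int) := by
        simp
        ring
      rw [hcast]
      have hrec := ih (pending ++ [x]) maps s hdrop' hpend'
      simp only at hrec
      rw [hrec, List.append_assoc]
      rfl

-- ===== VERDICT (by name: the statement is the Claim_ definition above) =====
theorem get_translation_maps_py_spec : Claim_equal_get_translation_maps_py := by
  intro mt _hdom _hpre
  unfold Spec_get_translation_maps_py get_translation_maps_py get_translation_maps_py_alt
  have hB := pvB_loop mt mt [] [] 0 (by simp) (by simp)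
  simp only [List.length_nil, Nat.add_zero, Nat.cast_zero, List.nil_append] at hB
  rw [hB]
  simpa using pvA_loop mt [] []
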